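-- pv_equiv track=rewrite | github.com/lyft/cartography | cartography/intel/gcp/iam.py | transform_bindings
-- ===== SOURCE A (Python) =====
-- from typing import Dict
--
-- def transform_bindings(bindings: Dict, project_id: str) -> tuple:
--     users = []
--     groups = []
--     domains = []
--     service_account = []
--     entity_list = []
--     public_access = False
--     for binding in bindings:
--         for member in binding['members']:
--             if member.startswith('allUsers') or member.startswith('allAuthenticatedUsers'):
--                 public_access = True
--             else:
--                 if member.startswith('user:'):
--                     usr = member[len('user:'):]
--                     users.append({
--                         "id": f'projects/{project_id}/users/{usr}',
--                         "email": usr,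
--                         "name": usr.split("@")[0],
--                     })
--
--                 elif member.startswith('group:'):
--                     grp = member[len('group:'):]
--                     groups.append({
--                         "id": f'projects/{project_id}/groups/{grp}',
--                         "email": grp,
--                         "name": grp.split('@')[0],
--                     })
--
--                 elif member.startswith('domain:'):
--                     dmn = member[len('domain:'):]
--                     domains.append({
--                         "id": f'projects/{project_id}/domains/{dmn}',
--                         "email": dmn,
--                         "name": dmn,
--                     })
--
--                 elif member.startswith('serviceAccount:'):
--                     sac = member[len('serviceAccount:'):]
--                     service_account.append({
--                         "id": f'projects/{project_id}/service_account/{sac}',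
--                         "email": sac,
--                         "name": sac,
--                     })
--
--     entity_list.extend(users)
--     entity_list.extend(groups)
--     entity_list.extend(domains)
--     entity_list.extend(service_account)
--     # return (
--     #     [dict(s) for s in {frozenset(d.items()) for d in users}],
--     #     [dict(s) for s in {frozenset(d.items()) for d in groups}],
--     #     [dict(s) for s in {frozenset(d.items()) for d in domains}],
--     # )
--     return entity_list, public_access
-- ===== SOURCE B (Python) =====
-- PREFIXES = [
--     ('user:', 'users', True),
--     ('group:', 'groups', True),
--     ('domain:', 'domains', False),
--     ('serviceAccount:', 'service_account', False),
-- ]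
--
--
-- def transform_bindings(bindings, project_id):
--     tagged = []
--     public_access = False
--     for binding in bindings:
--         for member in binding['members']:
--             if member.startswith('allUsers') or member.startswith('allAuthenticatedUsers'):
--                 public_access = True
--                 continue
--             for idx, (prefix, segment, local) in enumerate(PREFIXES):
--                 if member.startswith(prefix):
--                     rest = member[len(prefix):]
--                     tagged.append((idx, {
--                         "id": f'projects/{project_id}/{segment}/{rest}',
--                         "email": rest,
--                         "name": rest.split('@')[0] if local else rest,
--                     }))
--                     break
--     tagged.sort(key=lambda t: t[0])
--     return [d for _, d in tagged], public_access
-- ===== Notes on version B (the rewrite author's own statement) =====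
-- stated objective: alternative
-- what changed: A categorizes members through a four-way if/elif chain into four hand-named accumulator lists concatenated at the end; B drives a single prefix-config table, collects one category-tagged list in a single pass and obtains the final order by a stable sort on the category tag.
import Mathlib
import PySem

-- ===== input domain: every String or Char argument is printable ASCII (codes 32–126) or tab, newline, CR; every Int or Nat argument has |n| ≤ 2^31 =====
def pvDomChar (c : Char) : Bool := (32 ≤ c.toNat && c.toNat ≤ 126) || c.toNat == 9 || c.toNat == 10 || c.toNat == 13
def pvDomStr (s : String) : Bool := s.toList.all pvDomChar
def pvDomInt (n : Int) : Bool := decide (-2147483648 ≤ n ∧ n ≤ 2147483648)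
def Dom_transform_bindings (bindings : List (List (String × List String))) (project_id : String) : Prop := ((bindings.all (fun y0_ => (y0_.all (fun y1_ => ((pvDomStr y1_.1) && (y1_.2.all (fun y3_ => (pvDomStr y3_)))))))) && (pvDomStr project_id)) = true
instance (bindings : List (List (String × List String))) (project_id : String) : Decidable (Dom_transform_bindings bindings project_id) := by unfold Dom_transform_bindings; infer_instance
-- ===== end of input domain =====

-- B replaces A's four hand-named accumulator lists and if/elif chain by a prefix table,
-- one tagged output list and a stable sort on the category tag (objective: alternative, same cost).

-- ===== PORT A =====
-- A's per-member loop body: state = (users, groups, domains, service_account, public_access)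
def pvStepA (project_id : String)
    (st : List (List (String × String)) × List (List (String × String)) × List (List (String × String)) × List (List (String × String)) × Bool)
    (member : String) :
    List (List (String × String)) × List (List (String × String)) × List (List (String × String)) × List (List (String × String)) × Bool :=
  if PySem.Str.startswith member "allUsers" || PySem.Str.startswith member "allAuthenticatedUsers" then
    (st.1, st.2.1, st.2.2.1, st.2.2.2.1, true)
  else if PySem.Str.startswith member "user:" then
    let usr := PySem.Str.slice member (some 5) none
    (st.1 ++ [[("id", "projects/" ++ project_id ++ "/users/" ++ usr), ("email", usr),
               ("name", ((PySem.Str.split? usr "@").getD []).headD "")]],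
     st.2.1, st.2.2.1, st.2.2.2.1, st.2.2.2.2)
  else if PySem.Str.startswith member "group:" then
    let grp := PySem.Str.slice member (some 6) none
    (st.1,
     st.2.1 ++ [[("id", "projects/" ++ project_id ++ "/groups/" ++ grp), ("email", grp),
                 ("name", ((PySem.Str.split? grp "@").getD []).headD "")]],
     st.2.2.1, st.2.2.2.1, st.2.2.2.2)
  else if PySem.Str.startswith member "domain:" then
    let dmn := PySem.Str.slice member (some 7) none
    (st.1, st.2.1,
     st.2.2.1 ++ [[("id", "projects/" ++ project_id ++ "/domains/" ++ dmn), ("email", dmn),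
                   ("name", dmn)]],
     st.2.2.2.1, st.2.2.2.2)
  else if PySem.Str.startswith member "serviceAccount:" then
    let sac := PySem.Str.slice member (some 15) none
    (st.1, st.2.1, st.2.2.1,
     st.2.2.2.1 ++ [[("id", "projects/" ++ project_id ++ "/service_account/" ++ sac), ("email", sac),
                     ("name", sac)]],
     st.2.2.2.2)
  else st

-- binding['members'] raises KeyError when the key is missing; those inputs are excluded by Pre_ below.
def transform_bindings (bindings : List (List (String × List String))) (project_id : String) : (List (List (String × String))) × Bool :=
  let st := bindings.foldl
    (fun st binding => (PySem.Dict.getD ⟨binding⟩ "members" []).foldl (pvStepA project_id) st)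
    ([], [], [], [], false)
  (st.1 ++ st.2.1 ++ st.2.2.1 ++ st.2.2.2.1, st.2.2.2.2)

-- ===== PORT B =====
-- B's prefix table: (prefix, id-path segment, name is the local part before '@')
def pvPrefixes : List (String × String × Bool) :=
  [("user:", "users", true), ("group:", "groups", true),
   ("domain:", "domains", false), ("serviceAccount:", "service_account", false)]

-- the 'for idx, (prefix, segment, local) in enumerate(PREFIXES): … break' scan
def pvFindCat (member : String) : List (Int × String × String × Bool) → Option (Int × String × String × Bool)
  | [] => none
  | e :: rest => if PySem.Str.startswith member e.2.1 then some e else pvFindCat member rest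

-- B's per-member loop body: state = (tagged, public_access)
def pvStepB (project_id : String) (st : List (Int × List (String × String)) × Bool) (member : String) :
    List (Int × List (String × String)) × Bool :=
  if PySem.Str.startswith member "allUsers" || PySem.Str.startswith member "allAuthenticatedUsers" then
    (st.1, true)
  else
    match pvFindCat member (PySem.List.enumerate pvPrefixes) with
    | some (idx, pre, seg, loc) =>
        let rest := PySem.Str.slice member (some (PySem.Str.len pre : Int)) none
        (st.1 ++ [(idx, [("id", "projects/" ++ project_id ++ "/" ++ seg ++ "/" ++ rest),
                         ("email", rest),
                         ("name", if loc then ((PySem.Str.split? rest "@").getD []).headD "" else rest)])],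
         st.2)
    | none => st

-- binding['members'] raises KeyError when the key is missing; those inputs are excluded by Pre_ below.
def transform_bindings_alt (bindings : List (List (String × List String))) (project_id : String) : (List (List (String × String))) × Bool :=
  let st := bindings.foldl
    (fun st binding => (PySem.Dict.getD ⟨binding⟩ "members" []).foldl (pvStepB project_id) st)
    ([], false)
  ((PySem.List.sorted st.1 (fun t => t.1)).map (·.2), st.2)

-- ===== PRECONDITION & SPEC =====
-- Pre_ excludes exactly the bindings without a 'members' key, on which Python A raises KeyError (B raises there too).
def Pre_transform_bindings (bindings : List (List (String × List String))) (project_id : String) : Prop :=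
  ∀ binding ∈ bindings, PySem.Dict.contains (⟨binding⟩ : PySem.Dict String (List String)) "members" = true
instance (bindings : List (List (String × List String))) (project_id : String) : Decidable (Pre_transform_bindings bindings project_id) := by unfold Pre_transform_bindings; infer_instance

def pvWitness_transform_bindings : (List (List (String × List String))) × String :=
  ([[("members", ["user:alice@example.com", "allUsers", "serviceAccount:sa@p.iam"])],
    [("members", ["group:dev@example.com", "domain:example.com", "stray"])]], "proj")

def Spec_transform_bindings (bindings : List (List (String × List String))) (project_id : String) (out : (List (List (String × String))) × Bool) : Prop := out = transform_bindings_alt bindings project_id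
instance (bindings : List (List (String × List String))) (project_id : String) (out : (List (List (String × String))) × Bool) : Decidable (Spec_transform_bindings bindings project_id out) := by unfold Spec_transform_bindings; infer_instance

-- ===== CLAIM (what is proved, stated in full; the proofs are below) =====
def Claim_equal_transform_bindings : Prop := ∀ (bindings : List (List (String × List String))) (project_id : String), Dom_transform_bindings bindings project_id → Pre_transform_bindings bindings project_id → Spec_transform_bindings bindings project_id (transform_bindings bindings project_id)

-- ===== LEMMAS AND PROOFS =====

-- the i-tagged entries of B's tagged list, in order
def pvFilt (i : Int) (t : List (Int × List (String × String))) : List (List (String × String)) :=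
  (t.filter (fun x => x.1 == i)).map (·.2)

-- invariant tying A's four accumulators to B's tagged list
def pvR (stA : List (List (String × String)) × List (List (String × String)) × List (List (String × String)) × List (List (String × String)) × Bool)
    (stB : List (Int × List (String × String)) × Bool) : Prop :=
  stA.1 = pvFilt 0 stB.1 ∧ stA.2.1 = pvFilt 1 stB.1 ∧ stA.2.2.1 = pvFilt 2 stB.1 ∧
  stA.2.2.2.1 = pvFilt 3 stB.1 ∧ stA.2.2.2.2 = stB.2 ∧
  ∀ x ∈ stB.1, x.1 = 0 ∨ x.1 = 1 ∨ x.1 = 2 ∨ x.1 = 3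

theorem pvFilt_append (i : Int) (t : List (Int × List (String × String))) (x : Int × List (String × String)) :
    pvFilt i (t ++ [x]) = pvFilt i t ++ (if x.1 == i then [x.2] else []) := by
  cases h : x.1 == i <;> simp [pvFilt, List.filter_append, h]

theorem pvGlue (a r x y z w : String) (h : x ++ y ++ z = w) :
    a ++ x ++ y ++ z ++ r = a ++ w ++ r := by
  subst h; simp [String.append_assoc]

theorem pvGlueU (p r : String) : "projects/" ++ p ++ "/" ++ "users" ++ "/" ++ r = "projects/" ++ p ++ "/users/" ++ r := pvGlue _ _ _ _ _ _ rfl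
theorem pvGlueG (p r : String) : "projects/" ++ p ++ "/" ++ "groups" ++ "/" ++ r = "projects/" ++ p ++ "/groups/" ++ r := pvGlue _ _ _ _ _ _ rfl
theorem pvGlueD (p r : String) : "projects/" ++ p ++ "/" ++ "domains" ++ "/" ++ r = "projects/" ++ p ++ "/domains/" ++ r := pvGlue _ _ _ _ _ _ rfl
theorem pvGlueS (p r : String) : "projects/" ++ p ++ "/" ++ "service_account" ++ "/" ++ r = "projects/" ++ p ++ "/service_account/" ++ r := pvGlue _ _ _ _ _ _ rfl

theorem pvEnum : PySem.List.enumerate pvPrefixes =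
    [(0, ("user:", "users", true)), (1, ("group:", "groups", true)),
     (2, ("domain:", "domains", false)), (3, ("serviceAccount:", "service_account", false))] := by
  decide

theorem pvStep_rel (project_id : String) (stA : _) (stB : _) (h : pvR stA stB) (m : String) :
    pvR (pvStepA project_id stA m) (pvStepB project_id stB m) := by
  obtain ⟨h0, h1, h2, h3, hp, ht⟩ := h
  have htx : ∀ (i : Int), i = 0 ∨ i = 1 ∨ i = 2 ∨ i = 3 →
      ∀ e, ∀ x ∈ stB.1 ++ [(i, e)], x.1 = 0 ∨ x.1 = 1 ∨ x.1 = 2 ∨ x.1 = 3 := by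
    intro i hi e x hx
    rcases List.mem_append.mp hx with hx | hx
    · exact ht x hx
    · simp at hx; subst hx; exact hi
  cases hpub : (PySem.Str.startswith m "allUsers" || PySem.Str.startswith m "allAuthenticatedUsers") with
  | true =>
    simp only [pvStepA, pvStepB, hpub, if_true]
    exact ⟨h0, h1, h2, h3, rfl, ht⟩
  | false =>
    cases hu : PySem.Str.startswith m "user:" with
    | true =>
      simp only [pvStepA, pvStepB, pvEnum, pvFindCat, hpub, hu, Bool.false_eq_true, if_false, if_true]
      refine ⟨?_, ?_, ?_, ?_, hp, htx 0 (by norm_num) _⟩ <;>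
        simp [pvFilt_append, h0, h1, h2, h3, pvGlueU, PySem.Str.len]
    | false =>
      cases hg : PySem.Str.startswith m "group:" with
      | true =>
        simp only [pvStepA, pvStepB, pvEnum, pvFindCat, hpub, hu, hg, Bool.false_eq_true, if_false, if_true]
        refine ⟨?_, ?_, ?_, ?_, hp, htx 1 (by norm_num) _⟩ <;>
          simp [pvFilt_append, h0, h1, h2, h3, pvGlueG, PySem.Str.len]
      | false =>
        cases hd : PySem.Str.startswith m "domain:" with
        | true =>
          simp only [pvStepA, pvStepB, pvEnum, pvFindCat, hpub, hu, hg, hd, Bool.false_eq_true, if_false, if_true]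
          refine ⟨?_, ?_, ?_, ?_, hp, htx 2 (by norm_num) _⟩ <;>
            simp [pvFilt_append, h0, h1, h2, h3, pvGlueD, PySem.Str.len]
        | false =>
          cases hs : PySem.Str.startswith m "serviceAccount:" with
          | true =>
            simp only [pvStepA, pvStepB, pvEnum, pvFindCat, hpub, hu, hg, hd, hs, Bool.false_eq_true, if_false, if_true]
            refine ⟨?_, ?_, ?_, ?_, hp, htx 3 (by norm_num) _⟩ <;>
              simp [pvFilt_append, h0, h1, h2, h3, pvGlueS, PySem.Str.len]
          | false =>
            simp only [pvStepA, pvStepB, pvEnum, pvFindCat, hpub, hu, hg, hd, hs, Bool.false_eq_true, if_false]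
            exact ⟨h0, h1, h2, h3, hp, ht⟩

theorem pvFold_members (project_id : String) (ms : List String) :
    ∀ stA stB, pvR stA stB → pvR (ms.foldl (pvStepA project_id) stA) (ms.foldl (pvStepB project_id) stB) := by
  induction ms with
  | nil => intro _ _ h; exact h
  | cons m ms ih =>
    intro stA stB h
    exact ih _ _ (pvStep_rel project_id stA stB h m)

theorem pvFold_bindings (project_id : String) (bs : List (List (String × List String))) :
    ∀ stA stB, pvR stA stB →
      pvR (bs.foldl (fun st binding => (PySem.Dict.getD ⟨binding⟩ "members" []).foldl (pvStepA project_id) st) stA)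
          (bs.foldl (fun st binding => (PySem.Dict.getD ⟨binding⟩ "members" []).foldl (pvStepB project_id) st) stB) := by
  induction bs with
  | nil => intro _ _ h; exact h
  | cons b bs ih =>
    intro stA stB h
    exact ih _ _ (pvFold_members project_id _ stA stB h)

theorem pvInsertMid (x : Int × List (String × String)) :
    ∀ (A B : List (Int × List (String × String))),
      (∀ a ∈ A, ¬ x.1 < a.1) → (∀ b ∈ B, x.1 < b.1) →
      PySem.List.insertBy (fun a b => decide (a.1 < b.1)) x (A ++ B) = A ++ x :: B := by
  intro A
  induction A with
  | nil =>
    intro B _ hB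
    cases B with
    | nil => simp [PySem.List.insertBy]
    | cons b B' => simp [PySem.List.insertBy, hB b (by simp)]
  | cons a A' ih =>
    intro B hA hB
    have ha : ¬ x.1 < a.1 := hA a (by simp)
    have hA' : ∀ a' ∈ A', ¬ x.1 < a'.1 := fun a' h' => hA a' (by simp [h'])
    simp [PySem.List.insertBy, ha, ih B hA' hB]

theorem pvSortPart :
    ∀ (t : List (Int × List (String × String))),
      (∀ x ∈ t, x.1 = 0 ∨ x.1 = 1 ∨ x.1 = 2 ∨ x.1 = 3) →
      ∀ P0 P1 P2 P3 : List (Int × List (String × String)),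
        (∀ x ∈ P0, x.1 = 0) → (∀ x ∈ P1, x.1 = 1) → (∀ x ∈ P2, x.1 = 2) → (∀ x ∈ P3, x.1 = 3) →
        t.foldl (fun acc x => PySem.List.insertBy (fun a b => decide (a.1 < b.1)) x acc) (P0 ++ P1 ++ P2 ++ P3)
          = (P0 ++ t.filter (fun x => x.1 == 0)) ++ (P1 ++ t.filter (fun x => x.1 == 1))
            ++ (P2 ++ t.filter (fun x => x.1 == 2)) ++ (P3 ++ t.filter (fun x => x.1 == 3)) := by
  intro t
  induction t with
  | nil => intro _ P0 P1 P2 P3 _ _ _ _; simp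
  | cons x t ih =>
    intro ht P0 P1 P2 P3 hP0 hP1 hP2 hP3
    have ht' : ∀ y ∈ t, y.1 = 0 ∨ y.1 = 1 ∨ y.1 = 2 ∨ y.1 = 3 := fun y hy => ht y (by simp [hy])
    have hx := ht x (by simp)
    simp only [List.foldl_cons]
    rcases hx with hx | hx | hx | hx
    · have e1 : P0 ++ P1 ++ P2 ++ P3 = P0 ++ (P1 ++ P2 ++ P3) := by simp [List.append_assoc]
      rw [e1, pvInsertMid x P0 (P1 ++ P2 ++ P3)
            (fun a ha => by rw [hx, hP0 a ha]; omega)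
            (fun b hb => by
              rw [hx]
              rcases List.mem_append.mp hb with hb | hb
              · rcases List.mem_append.mp hb with hb | hb
                · rw [hP1 b hb]; omega
                · rw [hP2 b hb]; omega
              · rw [hP3 b hb]; omega)]
      have e2 : P0 ++ x :: (P1 ++ P2 ++ P3) = (P0 ++ [x]) ++ P1 ++ P2 ++ P3 := by simp
      rw [e2, ih ht' (P0 ++ [x]) P1 P2 P3
            (fun y hy => by
              rcases List.mem_append.mp hy with hy | hy
              · exact hP0 y hy
              · simp at hy; rw [hy, hx])
            hP1 hP2 hP3]
      simp [hx, List.append_assoc]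
    · have e1 : P0 ++ P1 ++ P2 ++ P3 = (P0 ++ P1) ++ (P2 ++ P3) := by simp [List.append_assoc]
      rw [e1, pvInsertMid x (P0 ++ P1) (P2 ++ P3)
            (fun a ha => by
              rw [hx]
              rcases List.mem_append.mp ha with ha | ha
              · rw [hP0 a ha]; omega
              · rw [hP1 a ha]; omega)
            (fun b hb => by
              rw [hx]
              rcases List.mem_append.mp hb with hb | hb
              · rw [hP2 b hb]; omega
              · rw [hP3 b hb]; omega)]
      have e2 : (P0 ++ P1) ++ x :: (P2 ++ P3) = P0 ++ (P1 ++ [x]) ++ P2 ++ P3 := by simp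
      rw [e2, ih ht' P0 (P1 ++ [x]) P2 P3 hP0
            (fun y hy => by
              rcases List.mem_append.mp hy with hy | hy
              · exact hP1 y hy
              · simp at hy; rw [hy, hx])
            hP2 hP3]
      simp [hx, List.append_assoc]
    · have e1 : P0 ++ P1 ++ P2 ++ P3 = (P0 ++ P1 ++ P2) ++ P3 := by simp [List.append_assoc]
      rw [e1, pvInsertMid x (P0 ++ P1 ++ P2) P3
            (fun a ha => by
              rw [hx]
              rcases List.mem_append.mp ha with ha | ha
              · rcases List.mem_append.mp ha with ha | ha
                · rw [hP0 a ha]; omega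
                · rw [hP1 a ha]; omega
              · rw [hP2 a ha]; omega)
            (fun b hb => by rw [hx, hP3 b hb]; omega)]
      have e2 : (P0 ++ P1 ++ P2) ++ x :: P3 = P0 ++ P1 ++ (P2 ++ [x]) ++ P3 := by simp
      rw [e2, ih ht' P0 P1 (P2 ++ [x]) P3 hP0 hP1
            (fun y hy => by
              rcases List.mem_append.mp hy with hy | hy
              · exact hP2 y hy
              · simp at hy; rw [hy, hx])
            hP3]
      simp [hx, List.append_assoc]
    · have e1 : P0 ++ P1 ++ P2 ++ P3 = (P0 ++ P1 ++ P2 ++ P3) ++ [] := by simp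
      rw [e1, pvInsertMid x (P0 ++ P1 ++ P2 ++ P3) []
            (fun a ha => by
              rw [hx]
              rcases List.mem_append.mp ha with ha | ha
              · rcases List.mem_append.mp ha with ha | ha
                · rcases List.mem_append.mp ha with ha | ha
                  · rw [hP0 a ha]; omega
                  · rw [hP1 a ha]; omega
                · rw [hP2 a ha]; omega
              · rw [hP3 a ha]; omega)
            (by simp)]
      have e2 : (P0 ++ P1 ++ P2 ++ P3) ++ x :: [] = P0 ++ P1 ++ P2 ++ (P3 ++ [x]) := by simp
      rw [e2, ih ht' P0 P1 P2 (P3 ++ [x]) hP0 hP1 hP2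
            (fun y hy => by
              rcases List.mem_append.mp hy with hy | hy
              · exact hP3 y hy
              · simp at hy; rw [hy, hx])]
      simp [hx, List.append_assoc]

theorem pvSorted_eq (t : List (Int × List (String × String)))
    (ht : ∀ x ∈ t, x.1 = 0 ∨ x.1 = 1 ∨ x.1 = 2 ∨ x.1 = 3) :
    PySem.List.sorted t (fun x => x.1)
      = t.filter (fun x => x.1 == 0) ++ t.filter (fun x => x.1 == 1)
        ++ t.filter (fun x => x.1 == 2) ++ t.filter (fun x => x.1 == 3) := by
  rw [PySem.List.sorted_eq_foldl_insertBy]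
  have h := pvSortPart t ht [] [] [] [] (by simp) (by simp) (by simp) (by simp)
  simpa using h

theorem transform_bindings_spec : Claim_equal_transform_bindings := by
  intro bindings project_id _ _
  unfold Spec_transform_bindings transform_bindings transform_bindings_alt
  have hR := pvFold_bindings project_id bindings ([], [], [], [], false) ([], false)
    ⟨by simp [pvFilt], by simp [pvFilt], by simp [pvFilt], by simp [pvFilt], rfl, by simp⟩
  obtain ⟨h0, h1, h2, h3, hp, ht⟩ := hR
  refine Prod.ext ?_ hp
  simp only
  rw [pvSorted_eq _ ht, h0, h1, h2, h3]
  simp [pvFilt, List.append_assoc]
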